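-- pv_equiv track=rewrite | github.com/LeeJoEun-01/coding-test | 프로그래머스/2/42890. 후보키/후보키.py | check
-- ===== SOURCE A (Python) =====
-- def check(com):
--     n = len(com)
--     key_combi = []
--     for i in range(len(com[0])):
--         tmp = []
--         for j in range(n):
--             tmp.append(com[j][i])
--
--         if tmp in key_combi:
--             return False
--         key_combi.append(tmp)
--
--     return True
-- ===== SOURCE B (Python) =====
-- def check(com):
--     cols = sorted(zip(*com))
--     return all(a != b for a, b in zip(cols, cols[1:]))
-- ===== Notes on version B (the rewrite author's own statement) =====
-- stated objective: alternative
-- what changed: A scans columns left to right, keeping a list of seen columns and early-returning on a membership hit; B sorts the list of columns (lexicographically, via sorted(zip(*com))) and then checks that no two adjacent sorted columns are equal.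
-- outside the precondition, e.g. on check([['a', 'a', 'x'], ['a', 'a']]): A returns False, B returns False
import Mathlib
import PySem

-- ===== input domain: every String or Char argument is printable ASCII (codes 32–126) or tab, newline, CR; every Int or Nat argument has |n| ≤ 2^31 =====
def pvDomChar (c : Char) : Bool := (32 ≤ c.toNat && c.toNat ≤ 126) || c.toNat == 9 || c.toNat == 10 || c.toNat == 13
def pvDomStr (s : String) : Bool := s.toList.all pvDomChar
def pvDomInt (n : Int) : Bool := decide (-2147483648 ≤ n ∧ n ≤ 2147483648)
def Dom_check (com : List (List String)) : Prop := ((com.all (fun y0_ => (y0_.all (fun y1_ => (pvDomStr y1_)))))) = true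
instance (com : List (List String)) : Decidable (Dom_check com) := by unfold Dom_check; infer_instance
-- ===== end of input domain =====

-- B sorts the columns and checks adjacent pairs instead of A's incremental membership scan.
-- Equivalence is about the return value only; neither version mutates its argument.

-- ===== PORT A =====
def checkLoop (com : List (List String)) (n : Int) : List Int → List (List String) → Bool
  | [], _kc => true
  | i :: is, kc =>
    let tmp := (PySem.List.pyRange 0 n 1).foldl
      (fun acc j => acc ++ [PySem.List.pyGetD (PySem.List.pyGetD com j []) i ""]) []
    if tmp ∈ kc then false
    else checkLoop com n is (kc ++ [tmp])

def check (com : List (List String)) : Bool :=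
  let n : Int := com.length
  checkLoop com n (PySem.List.pyRange 0 (((PySem.List.pyGetD com 0 []).length : Int)) 1) []

-- ===== PORT B =====
-- termination helper for zipStar (cited by decreasing_by)
theorem sum_map_tail_le (rs : List (List String)) :
    ((rs.map List.tail).map List.length).sum ≤ (rs.map List.length).sum := by
  induction rs with
  | nil => simp
  | cons r rs ih =>
    simp only [List.map_cons, List.sum_cons]
    have : r.tail.length ≤ r.length := by
      cases r <;> simp
    omega

-- zip(*com): columns of com, truncated at the shortest row (exact port of Python's zip)
def zipStar (rows : List (List String)) : List (List String) :=
  if h : rows.isEmpty || rows.any List.isEmpty then []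
  else (rows.map (fun r => r.headD "")) :: zipStar (rows.map List.tail)
termination_by (rows.map List.length).sum
decreasing_by
  simp only [Bool.or_eq_true, List.isEmpty_iff, List.any_eq_true, not_or] at h
  push_neg at h
  obtain ⟨h1, h2⟩ := h
  simp only [List.map_subtype, List.unattach_attach]
  cases rows with
  | nil => exact absurd rfl h1
  | cons r rs =>
    have hr : r.tail.length < r.length := by
      have := h2 r (by simp)
      cases r <;> simp_all
    have := sum_map_tail_le rs
    simp only [List.map_cons, List.sum_cons]
    omega

def check_alt (com : List (List String)) : Bool :=
  let cols := PySem.List.sorted (zipStar com) (fun x => x) false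
  (cols.zip (cols.drop 1)).all (fun p => p.1 != p.2)

-- ===== PRECONDITION & SPEC =====
-- Pre_ excludes the empty matrix and ragged matrices (a row shorter than the first row),
-- on which A raises IndexError unless an earlier duplicate column returns False first.
def Pre_check (com : List (List String)) : Prop :=
  com ≠ [] ∧ ∀ row ∈ com, (com.headD []).length ≤ row.length
instance (com : List (List String)) : Decidable (Pre_check com) := by unfold Pre_check; infer_instance

def pvWitness_check : List (List String) := [["a", "b"], ["c", "d"]]

def Spec_check (com : List (List String)) (out : Bool) : Prop := out = check_alt com
instance (com : List (List String)) (out : Bool) : Decidable (Spec_check com out) := by unfold Spec_check; infer_instance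

-- ===== CLAIM (what is proved, stated in full; the proofs are below) =====
def Claim_equal_check : Prop := ∀ (com : List (List String)), Dom_check com → Pre_check com → Spec_check com (check com)

-- ===== LEMMAS AND PROOFS =====

-- the i-th column as A computes it
def colF (com : List (List String)) (i : Int) : List String :=
  com.map (fun row => PySem.List.pyGetD row i "")

theorem checkLoop_iff (com : List (List String)) :
    ∀ (is : List Int) (kc : List (List String)), kc.Nodup →
      (checkLoop com (com.length : Int) is kc = true ↔ (kc ++ is.map (colF com)).Nodup) := by
  intro is
  induction is with
  | nil => intro kc hkc; rw [checkLoop]; simpa using hkc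
  | cons i is ih =>
    intro kc hkc
    rw [checkLoop,
      PySem.List.foldl_pyRange_zero_pyGetD' com ([] : List String)
        (fun acc row => acc ++ [PySem.List.pyGetD row i ""]) [],
      PySem.List.foldl_append_singleton_eq_map]
    simp only [List.nil_append]
    by_cases hmem : colF com i ∈ kc
    · simp only [colF] at hmem
      simp only [hmem, if_true]
      constructor
      · intro h; exact absurd h (by simp)
      · intro h
        exact absurd h (by
          simp only [List.map_cons, colF]
          intro hnd
          have := List.disjoint_of_nodup_append hnd (a := com.map fun row => PySem.List.pyGetD row i "") hmem (by simp)
          exact this)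
    · simp only [colF] at hmem
      simp only [hmem, if_false]
      have hkc' : (kc ++ [com.map fun row => PySem.List.pyGetD row i ""]).Nodup := by
        simp [List.nodup_append, hkc, fun h => hmem h]
        intro a ha hb; exact hmem (hb ▸ ha)
      rw [ih _ hkc']
      simp [colF, List.append_assoc]

-- tail/getD shift
theorem getD_tail (l : List String) (k : Nat) : l.tail.getD k "" = l.getD (k + 1) "" := by
  cases l <;> simp [List.getD]

-- characterisation of zipStar on rectangular-enough input
theorem zipStar_spec :
    ∀ (m : Nat) (rows : List (List String)), rows ≠ [] →
      (∀ r ∈ rows, m ≤ r.length) → (rows.headD []).length = m →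
      zipStar rows = (List.range m).map (fun k => rows.map (fun r => r.getD k "")) := by
  intro m
  induction m with
  | zero =>
    intro rows hne _ hhead
    rw [zipStar]
    cases rows with
    | nil => exact absurd rfl hne
    | cons r rs =>
      simp only [List.headD_cons] at hhead
      have : r.isEmpty := by simp [List.isEmpty_iff, List.eq_nil_of_length_eq_zero hhead]
      simp [this]
  | succ m ih =>
    intro rows hne hlen hhead
    have hnonempty : ∀ r ∈ rows, ¬ r.isEmpty := by
      intro r hr
      have := hlen r hr
      simp only [List.isEmpty_iff]
      intro h; subst h; simp at this
    rw [zipStar]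
    have hguard : ¬ ((rows.isEmpty || rows.any List.isEmpty) = true) := by
      simp only [Bool.or_eq_true, List.isEmpty_iff, List.any_eq_true, not_or]
      push_neg
      exact ⟨hne, fun r hr => by simpa using hnonempty r hr⟩
    rw [dif_neg hguard]
    have htails : zipStar (rows.map List.tail) =
        (List.range m).map (fun k => (rows.map List.tail).map (fun r => r.getD k "")) := by
      apply ih
      · intro h
        cases rows with
        | nil => exact absurd rfl hne
        | cons r rs => simp at h
      · intro r hr
        obtain ⟨r', hr', rfl⟩ := List.mem_map.mp hr
        have := hlen r' hr'
        cases r' <;> simp_all <;> omega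
      · cases rows with
        | nil => exact absurd rfl hne
        | cons r rs =>
          simp only [List.map_cons, List.headD_cons]
          simp only [List.headD_cons] at hhead
          cases r <;> simp_all
    rw [htails]
    rw [List.range_succ_eq_map]
    simp only [List.map_cons, List.map_map]
    congr 1
    · apply List.map_congr_left
      intro r _
      cases r <;> simp [List.getD]
    · apply List.map_congr_left
      intro k _
      simp only [Function.comp]
      apply List.map_congr_left
      intro r _
      exact (getD_tail r k).symm ▸ rfl

-- the default List-String decidable-LT instance agrees with the LinearOrder one
theorem sorted_inst (xs : List (List String)) :
    (@PySem.List.sorted (List String) (List String) List.instLT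
        (fun a b => a.decidableLT b) xs (fun x => x) false)
    = (@PySem.List.sorted (List String) (List String) List.instLinearOrder.toLT
        LinearOrder.toDecidableLT xs (fun x => x) false) := by
  have h : (fun (a b : List String) => a.decidableLT b)
      = (LinearOrder.toDecidableLT (α := List String)) := by
    funext a b; exact Subsingleton.elim _ _
  rw [h]

-- on a ≤-sorted list, "no two adjacent elements equal" is exactly Nodup
theorem adj_nodup {α : Type} [LinearOrder α] :
    ∀ (l : List α), l.Pairwise (· ≤ ·) →
      ((∀ p ∈ l.zip (l.drop 1), p.1 ≠ p.2) ↔ l.Nodup)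
  | [], _ => by simp
  | [a], _ => by simp
  | a :: b :: t, h => by
    have hab : a ≤ b := (List.pairwise_cons.mp h).1 b (by simp)
    have ht : (b :: t).Pairwise (· ≤ ·) := (List.pairwise_cons.mp h).2
    have hbt : ∀ x ∈ t, b ≤ x := (List.pairwise_cons.mp ht).1
    have ih := adj_nodup (b :: t) ht
    simp only [List.drop_succ_cons, List.drop_zero, List.zip_cons_cons, List.mem_cons,
      forall_eq_or_imp, ne_eq] at *
    constructor
    · rintro ⟨hne, hrest⟩
      have hnd := ih.mp hrest
      refine List.nodup_cons.mpr ⟨?_, hnd⟩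
      intro hmem
      rcases List.mem_cons.mp hmem with rfl | hat
      · exact hne rfl
      · exact hne (le_antisymm hab (hbt a hat))
    · intro hnd
      have h1 := List.nodup_cons.mp hnd
      exact ⟨fun hEq => h1.1 (hEq ▸ List.mem_cons_self), ih.mpr h1.2⟩

-- ===== VERDICT (by name: the statement is the Claim_ definition above) =====
theorem check_spec : Claim_equal_check := by
  intro com _hdom hpre
  obtain ⟨hne, hlen⟩ := hpre
  unfold Spec_check
  set m := (com.headD []).length with hm
  -- the common column list
  set C : List (List String) := (List.range m).map (fun k => com.map (fun r => r.getD k "")) with hC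
  -- A's side
  have hget0 : PySem.List.pyGetD com 0 [] = com.headD [] := by
    cases com with
    | nil => exact absurd rfl hne
    | cons r rs => simp [PySem.List.pyGetD_zero_cons]
  have hAiff : check com = true ↔ C.Nodup := by
    unfold check
    rw [checkLoop_iff com _ [] List.nodup_nil]
    rw [hget0, ← hm]
    simp only [List.nil_append]
    have hmap : (PySem.List.pyRange 0 (m : Int) 1).map (colF com) = C := by
      rw [PySem.List.pyRange_zero_nat, List.map_map, hC]
      apply List.map_congr_left
      intro k _
      simp [colF, Function.comp, PySem.List.pyGetD_natCast]
    rw [hmap]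
  -- B's side
  have hz : zipStar com = C := zipStar_spec m com hne hlen rfl
  have hBiff : check_alt com = true ↔ C.Nodup := by
    unfold check_alt
    rw [hz, sorted_inst]
    set S := (@PySem.List.sorted (List String) (List String) List.instLinearOrder.toLT
        LinearOrder.toDecidableLT C (fun x => x) false) with hS
    have hpair : S.Pairwise (· ≤ ·) := PySem.List.sorted_pairwise C (fun x => x)
    have hperm : S.Perm C := by
      rw [hS, ← sorted_inst]
      exact PySem.List.sorted_perm C (fun x => x) false
    show ((S.zip (S.drop 1)).all fun p => p.1 != p.2) = true ↔ C.Nodup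
    rw [List.all_eq_true]
    simp only [bne_iff_ne, ne_eq]
    rw [adj_nodup S hpair]
    exact hperm.nodup_iff
  rw [Bool.eq_iff_iff, hAiff, hBiff]
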